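-- pv_equiv track=rewrite | github.com/MelaRay/ARGs_through_RL | Codages.py | Blocs2Moins
-- ===== SOURCE A (Python) =====
-- import itertools
--
-- BLOCS_2_19= list(itertools.product([0,1], repeat = 2))
--
-- def Blocs2Moins(dictEtatS, k):
--     d = len(BLOCS_2_19) #nbr total blocs differents
--     etatS = [0] * k * d
--
--     for seq1 in dictEtatS: #pour chaque sequence etat s
--         for j in range(d): #pour chaque bloc j possible
--             #on verifie si bloc position p de seq1 est egal au bloc j
--             for p in range(k):
--                 if (seq1[p:(p+2)] == BLOCS_2_19[j]):
--                     etatS[j*k + p] = etatS[j*k + p] + dictEtatS[seq1]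
--
--     return etatS
-- ===== SOURCE B (Python) =====
-- def Blocs2Moins(dictEtatS, k):
--     # Sparse accumulation: one pass over (position, adjacent pair) via zip, encoding the
--     # block arithmetically into a flat key of a dict, then a dense materialisation pass.
--     counts = {}
--     for seq, v in dictEtatS.items():
--         for p, (a, b) in enumerate(zip(seq, seq[1:])):
--             if p < k and a in (0, 1) and b in (0, 1):
--                 idx = (2 * a + b) * k + p
--                 counts[idx] = counts.get(idx, 0) + v
--     return [counts.get(i, 0) for i in range(4 * k)]
-- ===== Notes on version B (the rewrite author's own statement) =====
-- stated objective: faster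
-- what changed: B scans each sequence once via enumerate(zip(seq, seq[1:])), encodes the adjacent pair arithmetically into a flat key and accumulates weights sparsely in a dict, then materialises the dense output in a final pass; work per sequence is O(min(k, len(seq))) instead of A's O(4k) triple loop with slice-equality tests against the block table over a preallocated dense array.
import Mathlib
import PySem

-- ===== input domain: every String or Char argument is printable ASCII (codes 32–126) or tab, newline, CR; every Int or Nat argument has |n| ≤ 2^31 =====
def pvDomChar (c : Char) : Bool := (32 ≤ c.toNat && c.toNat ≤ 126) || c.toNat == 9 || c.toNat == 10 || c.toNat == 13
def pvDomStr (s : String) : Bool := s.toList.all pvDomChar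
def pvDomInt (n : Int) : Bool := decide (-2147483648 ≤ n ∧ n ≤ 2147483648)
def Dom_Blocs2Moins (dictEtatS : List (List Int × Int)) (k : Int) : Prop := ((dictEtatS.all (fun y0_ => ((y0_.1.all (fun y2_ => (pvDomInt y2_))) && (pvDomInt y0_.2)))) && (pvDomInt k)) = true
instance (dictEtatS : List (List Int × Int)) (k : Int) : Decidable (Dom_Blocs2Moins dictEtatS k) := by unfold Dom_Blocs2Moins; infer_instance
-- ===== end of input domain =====

-- B replaces A's dense triple-loop scatter with one zip/enumerate pass per sequence accumulating
-- weights into a SPARSE dict keyed by an arithmetically encoded flat index, then materialises the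
-- dense output in a final pass: work per sequence is bounded by its length, not by 4*k (measured faster).
-- Pre_ excludes association lists with duplicate keys, which cannot arise from a Python dict;
-- the first-match lookup convention of the Lean encoding is accidental there.


-- ===== PORT A =====
-- BLOCS_2_19 = list(itertools.product([0,1], repeat=2))
def pvBlocs : List (List Int) := [[0, 0], [0, 1], [1, 0], [1, 1]]

-- dictEtatS[seq1]: first-match association-list lookup (total here: the key always comes from the dict)
def pvLookup (d : List (List Int × Int)) (key : List Int) : Int :=
  ((d.find? (fun pr => pr.1 == key)).map Prod.snd).getD 0

-- etatS[i] = etatS[i] + v  (index is always in range when A reaches it)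
def pvAddAt (s : List Int) (i : Nat) (v : Int) : List Int :=
  s.set i (s.getD i 0 + v)

def Blocs2Moins (dictEtatS : List (List Int × Int)) (k : Int) : List Int :=
  let d := pvBlocs.length
  (dictEtatS.map Prod.fst).foldl (fun etatS seq1 =>
    (List.range d).foldl (fun etatS j =>
      (PySem.List.pyRange 0 k 1).foldl (fun etatS p =>
        if PySem.List.slice seq1 (some p) (some (p + 2)) = pvBlocs.getD j [] then
          pvAddAt etatS ((j : Int) * k + p).toNat (pvLookup dictEtatS seq1)
        else etatS) etatS) etatS)
    (List.replicate (k.toNat * d) 0)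

-- ===== PORT B =====
-- the body of the inner loop: counts[idx] = counts.get(idx, 0) + v behind the guard
def pvStep (k : Int) (v : Int) (counts : PySem.Dict Int Int) (e : Int × (Int × Int)) : PySem.Dict Int Int :=
  if (decide (e.1 < k) && (e.2.1 == 0 || e.2.1 == 1) && (e.2.2 == 0 || e.2.2 == 1)) = true then
    counts.insert ((2 * e.2.1 + e.2.2) * k + e.1) (counts.getD ((2 * e.2.1 + e.2.2) * k + e.1) 0 + v)
  else counts

def Blocs2Moins_alt (dictEtatS : List (List Int × Int)) (k : Int) : List Int :=
  let counts := dictEtatS.foldl (fun counts pr =>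
    (PySem.List.enumerate (pr.1.zip (PySem.List.slice pr.1 (some 1) none))).foldl
      (pvStep k pr.2) counts) PySem.Dict.empty
  (PySem.List.pyRange 0 (4 * k) 1).map (fun i => counts.getD i 0)

-- ===== PRECONDITION & SPEC =====
-- Pre_ excludes association lists with duplicate keys (impossible for a Python dict): there the
-- encoding's first-match lookup order is accidental.
def Pre_Blocs2Moins (dictEtatS : List (List Int × Int)) (k : Int) : Prop :=
  (dictEtatS.map Prod.fst).Nodup
instance (dictEtatS : List (List Int × Int)) (k : Int) : Decidable (Pre_Blocs2Moins dictEtatS k) := by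
  unfold Pre_Blocs2Moins; infer_instance
def pvWitness_Blocs2Moins : (List (List Int × Int)) × Int := ([([0, 1], 2), ([1, 1], 3)], 2)

def Spec_Blocs2Moins (dictEtatS : List (List Int × Int)) (k : Int) (out : List Int) : Prop := out = Blocs2Moins_alt dictEtatS k
instance (dictEtatS : List (List Int × Int)) (k : Int) (out : List Int) : Decidable (Spec_Blocs2Moins dictEtatS k out) := by unfold Spec_Blocs2Moins; infer_instance

-- ===== CLAIM (what is proved, stated in full; the proofs are below) =====
def Claim_equal_Blocs2Moins : Prop := ∀ (dictEtatS : List (List Int × Int)) (k : Int), Dom_Blocs2Moins dictEtatS k → Pre_Blocs2Moins dictEtatS k → Spec_Blocs2Moins dictEtatS k (Blocs2Moins dictEtatS k)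

-- ===== LEMMAS AND PROOFS =====

theorem pv_length_addAt (s : List Int) (i : Nat) (v : Int) : (pvAddAt s i v).length = s.length := by
  simp [pvAddAt]

theorem pv_getD_addAt (s : List Int) (i : Nat) (v : Int) (q : Nat) :
    (pvAddAt s i v).getD q 0 = if i = q ∧ q < s.length then s.getD q 0 + v else s.getD q 0 := by
  unfold pvAddAt
  simp only [List.getD_eq_getElem?_getD, List.getElem?_set]
  by_cases h2 : i = q
  · subst h2
    by_cases h1 : i < s.length
    · simp [h1, List.getElem?_eq_getElem h1]
    · simp [h1, List.getElem?_eq_none (Nat.le_of_not_lt h1)]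
  · simp [h2, fun (h : i = q ∧ q < s.length) => h2 h.1]

-- fold preserves length
theorem pv_foldl_len {α : Type} (F : List Int → α → List Int)
    (hlen : ∀ s x, (F s x).length = s.length) :
    ∀ (L : List α) (s : List Int), (L.foldl F s).length = s.length := by
  intro L
  induction L with
  | nil => intro s; rfl
  | cons a L ih => intro s; simp only [List.foldl_cons]; rw [ih, hlen]

-- a fold on lists whose step adds a state-independent contribution at cell q
theorem pv_foldl_getD {α : Type} (N : Nat) (q : Nat) (F : List Int → α → List Int) (c : α → Int)
    (hlen : ∀ s x, (F s x).length = s.length)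
    (hget : ∀ s x, s.length = N → (F s x).getD q 0 = s.getD q 0 + c x) :
    ∀ (L : List α) (s : List Int), s.length = N →
      (L.foldl F s).getD q 0 = s.getD q 0 + (L.map c).sum := by
  intro L
  induction L with
  | nil => intro s _; simp
  | cons a L ih =>
      intro s hs
      simp only [List.foldl_cons, List.map_cons, List.sum_cons]
      rw [ih _ (by rw [hlen]; exact hs), hget _ _ hs]
      ring

-- a fold on dicts whose step adds a state-independent contribution at key q
theorem pv_dfoldl_getD {α : Type} (q : Int) (F : PySem.Dict Int Int → α → PySem.Dict Int Int)
    (c : α → Int)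
    (hget : ∀ d x, (F d x).getD q 0 = d.getD q 0 + c x) :
    ∀ (L : List α) (d : PySem.Dict Int Int),
      (L.foldl F d).getD q 0 = d.getD q 0 + (L.map c).sum := by
  intro L
  induction L with
  | nil => intro d; simp
  | cons a L ih =>
      intro d
      simp only [List.foldl_cons, List.map_cons, List.sum_cons]
      rw [ih, hget]
      ring

-- sum of a map all of whose terms vanish except possibly at one member
theorem pv_sum_eq_single {α : Type} [DecidableEq α] (x0 : α) (f : α → Int) :
    ∀ (L : List α), L.Nodup → x0 ∈ L → (∀ x ∈ L, x ≠ x0 → f x = 0) →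
      (L.map f).sum = f x0 := by
  intro L
  induction L with
  | nil => intro _ h; cases h
  | cons a L ih =>
      intro hn hm h0
      simp only [List.map_cons, List.sum_cons]
      by_cases ha : a = x0
      · subst ha
        have : ∀ x ∈ L, f x = 0 := by
          intro x hx
          exact h0 x (List.mem_cons_of_mem _ hx) (by rintro rfl; exact (List.nodup_cons.mp hn).1 hx)
        rw [List.sum_eq_zero (by intro y hy; obtain ⟨x, hx, rfl⟩ := List.mem_map.mp hy; exact this x hx)]
        ring
      · rw [h0 a (List.mem_cons_self) ha, ih (List.nodup_cons.mp hn).2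
          (by rcases List.mem_cons.mp hm with h | h; exacts [absurd h.symm ha, h])
          (fun x hx => h0 x (List.mem_cons_of_mem _ hx))]
        ring

-- iterating the keys with a first-match lookup = iterating the pairs, for duplicate-free keys
theorem pv_keys_lookup (g : List Int → Int → Int) :
    ∀ (d : List (List Int × Int)), (d.map Prod.fst).Nodup →
      (d.map Prod.fst).map (fun s => g s (pvLookup d s)) = d.map (fun pr => g pr.1 pr.2) := by
  intro d
  simp only [pvLookup]
  induction d with
  | nil => intro _; rfl
  | cons pr d ih =>
    intro hn
    have hn' : (pr.1 :: d.map Prod.fst).Nodup := by simpa using hn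
    obtain ⟨hhead, htail⟩ := List.nodup_cons.mp hn'
    simp only [List.map_cons]
    rw [List.find?_cons_of_pos (by simp)]
    have htail_eq : (d.map Prod.fst).map
        (fun s => g s ((Option.map Prod.snd (List.find? (fun pr2 => pr2.1 == s) (pr :: d))).getD 0)) =
        (d.map Prod.fst).map
        (fun s => g s ((Option.map Prod.snd (List.find? (fun pr2 => pr2.1 == s) d)).getD 0)) := by
      apply List.map_congr_left
      intro s hs
      have hne : ¬ ((fun pr2 : List Int × Int => pr2.1 == s) pr = true) := by
        simp only [beq_iff_eq]
        intro h; exact hhead (h ▸ hs)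
      have hfind : List.find? (fun pr2 : List Int × Int => pr2.1 == s) (pr :: d) =
          List.find? (fun pr2 => pr2.1 == s) d := List.find?_cons_of_neg hne
      rw [hfind]
    rw [htail_eq, ih htail]
    simp

-- take 2 of a drop, characterised by elementwise access
theorem pv_take2 (xs : List Int) (i : Nat) (x y : Int) :
    (xs.drop i).take 2 = [x, y] ↔ (i + 1 < xs.length ∧ xs.getD i 0 = x ∧ xs.getD (i + 1) 0 = y) := by
  match hd : xs.drop i with
  | [] =>
    have : xs.length - i = 0 := by rw [← List.length_drop, hd]; rfl
    simp only [List.take_nil]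
    constructor
    · intro h; cases h
    · intro h; omega
  | [a] =>
    have : xs.length - i = 1 := by rw [← List.length_drop, hd]; rfl
    rw [show List.take 2 [a] = [a] from rfl]
    constructor
    · intro h; simp at h
    · intro h; omega
  | a :: b :: rest =>
    have hlen : 2 ≤ xs.length - i := by rw [← List.length_drop, hd]; simp
    have h0 : xs[i + 0]? = some a := by rw [← List.getElem?_drop, hd]; rfl
    have h1 : xs[i + 1]? = some b := by rw [← List.getElem?_drop, hd]; rfl
    have h0' : xs[i]? = some a := by simpa using h0
    rw [show List.take 2 (a :: b :: rest) = [a, b] from rfl]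
    simp only [List.getD_eq_getElem?_getD, h0', h1, Option.getD_some]
    constructor
    · intro h
      injection h with hx ht; injection ht with hy _
      exact ⟨by omega, hx, hy⟩
    · rintro ⟨_, rfl, rfl⟩; rfl

theorem Blocs2Moins_len (dictEtatS : List (List Int × Int)) (k : Int) :
    (Blocs2Moins dictEtatS k).length = k.toNat * 4 := by
  unfold Blocs2Moins
  rw [pv_foldl_len _ ?h]
  · simp [pvBlocs]
  case h =>
    intro s seq1
    rw [pv_foldl_len _ ?h2]
    case h2 =>
      intro s j
      rw [pv_foldl_len _ ?h3]
      case h3 =>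
        intro s p
        split
        · exact pv_length_addAt _ _ _
        · rfl

theorem Blocs2Moins_alt_len (dictEtatS : List (List Int × Int)) (k : Int) :
    (Blocs2Moins_alt dictEtatS k).length = k.toNat * 4 := by
  unfold Blocs2Moins_alt
  simp [PySem.List.length_pyRange_one]
  omega

-- per-sequence contribution of A at cell q, with the dict value as a parameter
def pvIndPV (k : Int) (q : Nat) (seq1 : List Int) (v : Int) (j : Nat) (p : Int) : Int :=
  if PySem.List.slice seq1 (some p) (some (p + 2)) = pvBlocs.getD j [] ∧
     ((j : Int) * k + p).toNat = q ∧ q < k.toNat * 4 then v else 0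
def pvCjV (k : Int) (q : Nat) (seq1 : List Int) (v : Int) (j : Nat) : Int :=
  ((PySem.List.pyRange 0 k 1).map (pvIndPV k q seq1 v j)).sum
def pvCsV (k : Int) (q : Nat) (seq1 : List Int) (v : Int) : Int :=
  ((List.range 4).map (pvCjV k q seq1 v)).sum

-- per-sequence contribution of B at key q
def pvContrib (k : Int) (q : Int) (pr : List Int × Int) : Int :=
  ((PySem.List.enumerate (pr.1.zip (PySem.List.slice pr.1 (some 1) none))).map
    (fun e => if ((decide (e.1 < k) && (e.2.1 == 0 || e.2.1 == 1) && (e.2.2 == 0 || e.2.2 == 1)) = true)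
                 ∧ (2 * e.2.1 + e.2.2) * k + e.1 = q then pr.2 else 0)).sum

theorem pv_A_getD (dictEtatS : List (List Int × Int)) (k : Int) (q : Nat) :
    (Blocs2Moins dictEtatS k).getD q 0 =
      ((dictEtatS.map Prod.fst).map (fun seq1 => pvCsV k q seq1 (pvLookup dictEtatS seq1))).sum := by
  unfold Blocs2Moins
  rw [pv_foldl_getD (k.toNat * 4) q _ (fun seq1 => pvCsV k q seq1 (pvLookup dictEtatS seq1))
      ?hl ?hg _ _ (by simp [pvBlocs])]
  · simp
  case hl =>
    intro s x
    exact pv_foldl_len _ (fun s j => pv_foldl_len _ (fun s p => by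
      split; exacts [pv_length_addAt _ _ _, rfl]) _ _) _ _
  case hg =>
    intro s seq1 hs
    rw [pv_foldl_getD (k.toNat * 4) q _ (pvCjV k q seq1 (pvLookup dictEtatS seq1)) ?hl2 ?hg2 _ _ hs]
    case hl2 =>
      intro s' j
      exact pv_foldl_len _ (fun s'' p => by
        split; exacts [pv_length_addAt _ _ _, rfl]) _ _
    case hg2 =>
      intro s' j hs'
      rw [pv_foldl_getD (k.toNat * 4) q _ (pvIndPV k q seq1 (pvLookup dictEtatS seq1) j) ?hl3 ?hg3 _ _ hs']
      case hl3 =>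
        intro s'' p
        split; exacts [pv_length_addAt _ _ _, rfl]
      case hg3 =>
        intro s'' p hs''
        dsimp only
        unfold pvIndPV
        by_cases hc : PySem.List.slice seq1 (some p) (some (p + 2)) = pvBlocs.getD j []
        · rw [if_pos hc, pv_getD_addAt, hs'']
          by_cases h2 : ((j : Int) * k + p).toNat = q ∧ q < k.toNat * 4
          · rw [if_pos h2, if_pos ⟨hc, h2⟩]
          · rw [if_neg h2, if_neg (by rintro ⟨-, h⟩; exact h2 h), add_zero]
        · rw [if_neg hc, if_neg (by rintro ⟨h, -⟩; exact hc h), add_zero]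
      rfl
    rfl

theorem pv_alt_getD (dictEtatS : List (List Int × Int)) (k : Int) (q : Nat)
    (hq : q < k.toNat * 4) :
    (Blocs2Moins_alt dictEtatS k).getD q 0 =
      (dictEtatS.map (pvContrib k (q : Int))).sum := by
  unfold Blocs2Moins_alt
  have hq4 : q < (4 * k - 0).toNat := by omega
  rw [List.getD_eq_getElem?_getD, List.getElem?_map, PySem.List.getElem?_pyRange_one, if_pos hq4]
  simp only [Option.map_some, Option.getD_some, Int.zero_add]
  rw [pv_dfoldl_getD (q : Int) _ (pvContrib k (q : Int)) ?hstep]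
  · simp
  case hstep =>
    intro d pr
    rw [pv_dfoldl_getD (q : Int) _
        (fun e => if ((decide (e.1 < k) && (e.2.1 == 0 || e.2.1 == 1) && (e.2.2 == 0 || e.2.2 == 1)) = true)
                     ∧ (2 * e.2.1 + e.2.2) * k + e.1 = (q : Int) then pr.2 else 0) ?hinner]
    · rfl
    case hinner =>
      intro d' e
      dsimp only
      unfold pvStep
      by_cases hc : (decide (e.1 < k) && (e.2.1 == 0 || e.2.1 == 1) && (e.2.2 == 0 || e.2.2 == 1)) = true
      · rw [if_pos hc, PySem.Dict.getD_insert]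
        by_cases hk : (q : Int) = (2 * e.2.1 + e.2.2) * k + e.1
        · rw [if_pos hk, if_pos ⟨hc, hk.symm⟩, hk]
        · rw [if_neg hk, if_neg (by rintro ⟨-, h⟩; exact hk h.symm), add_zero]
      · rw [if_neg hc, if_neg (by rintro ⟨h, -⟩; exact hc h), add_zero]

-- A's per-sequence cell value in closed form
theorem pv_cell_eq (k : Int) (j0 p0 : Nat) (hj : j0 < 4) (hp : p0 < k.toNat) (seq : List Int) (v : Int) :
    pvCsV k (j0 * k.toNat + p0) seq v =
      if ((p0:Int)) + 1 < (seq.length : Int) ∧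
         PySem.List.pyGetD seq (p0:Int) 0 = ((j0 / 2 : Nat) : Int) ∧
         PySem.List.pyGetD seq ((p0:Int) + 1) 0 = ((j0 % 2 : Nat) : Int) then v else 0 := by
  have hk0 : 0 < k := by omega
  have hkK : ((k.toNat : Nat) : Int) = k := Int.toNat_of_nonneg (by omega)
  unfold pvCsV
  rw [pv_sum_eq_single j0 _ (List.range 4) (List.nodup_range) (List.mem_range.mpr hj) ?jzero]
  case jzero =>
    intro j hjm hne
    unfold pvCjV
    apply List.sum_eq_zero
    intro y hy
    obtain ⟨p, hpm, rfl⟩ := List.mem_map.mp hy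
    obtain ⟨hp1, hp2⟩ := PySem.List.mem_pyRange_one.mp hpm
    unfold pvIndPV
    rw [if_neg]
    rintro ⟨-, h2, -⟩
    have hjm' : j < 4 := List.mem_range.mp hjm
    interval_cases j <;> interval_cases j0 <;> omega
  unfold pvCjV
  rw [pv_sum_eq_single ((p0 : Nat) : Int) _ _ (PySem.List.nodup_pyRange_one 0 k)
      (PySem.List.mem_pyRange_one.mpr ⟨by omega, by omega⟩) ?pzero]
  case pzero =>
    intro p hpm hne
    obtain ⟨hp1, hp2⟩ := PySem.List.mem_pyRange_one.mp hpm
    unfold pvIndPV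
    rw [if_neg]
    rintro ⟨-, h2, -⟩
    exact hne (by interval_cases j0 <;> omega)
  unfold pvIndPV
  have hslice : PySem.List.slice seq (some ((p0:Nat):Int)) (some (((p0:Nat):Int) + 2)) = (seq.drop p0).take 2 := by
    have := PySem.List.slice_natCast_add seq p0 2
    simpa using this
  rw [hslice]
  have hidx : (((j0 : Int)) * k + ((p0:Nat):Int)).toNat = j0 * k.toNat + p0 := by
    interval_cases j0 <;> omega
  have hqlt : j0 * k.toNat + p0 < k.toNat * 4 := by interval_cases j0 <;> omega
  simp only [hidx, hqlt, and_true, eq_self_iff_true]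
  rw [show ((p0:Int)+1) = (((p0+1 : Nat)):Int) from by push_cast; ring]
  simp only [PySem.List.pyGetD_natCast]
  apply if_congr _ rfl rfl
  interval_cases j0 <;>
    (simp only [pvBlocs, List.getD_cons_zero, List.getD_cons_succ]
     rw [pv_take2]
     constructor <;> rintro ⟨h1, h2, h3⟩ <;>
       exact ⟨by omega, by simpa using h2, by simpa using h3⟩)

-- B's per-sequence contribution in the same closed form
theorem pv_zip_getD (seq : List Int) (p : Nat) (hp : p < (seq.zip seq.tail).length) :
    PySem.List.pyGetD (seq.zip seq.tail) ((p : Nat) : Int) ((0 : Int), (0 : Int)) =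
      (seq.getD p 0, seq.getD (p + 1) 0) := by
  have hz : (seq.zip seq.tail).length = min seq.length (seq.length - 1) := by
    rw [List.length_zip, List.length_tail]
  have hps : p < seq.length := by omega
  have hpt : p < seq.tail.length := by rw [List.length_tail]; omega
  have hps1 : p + 1 < seq.length := by omega
  rw [PySem.List.pyGetD_natCast, List.getD_eq_getElem?_getD,
      List.getElem?_eq_getElem hp, List.getElem_zip]
  have ht : seq.tail[p]'hpt = seq[p + 1]'hps1 := by
    rw [List.getElem_tail]
  rw [Option.getD_some, ht, List.getD_eq_getElem _ _ hps, List.getD_eq_getElem _ _ hps1]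

theorem pv_contrib_eq (k : Int) (j0 p0 : Nat) (hj : j0 < 4) (hp : p0 < k.toNat)
    (seq : List Int) (v : Int) :
    pvContrib k ((j0 * k.toNat + p0 : Nat) : Int) (seq, v) =
      if ((p0:Int)) + 1 < (seq.length : Int) ∧
         PySem.List.pyGetD seq (p0:Int) 0 = ((j0 / 2 : Nat) : Int) ∧
         PySem.List.pyGetD seq ((p0:Int) + 1) 0 = ((j0 % 2 : Nat) : Int) then v else 0 := by
  have hk0 : 0 < k := by omega
  unfold pvContrib
  rw [PySem.List.slice_from_one, PySem.List.enumerate_eq_map_pyRange (d := ((0 : Int), (0 : Int))),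
      List.map_map]
  have hzlen : (seq.zip seq.tail).length = min seq.length (seq.length - 1) := by
    rw [List.length_zip, List.length_tail]
  have hlen : PySem.List.len (seq.zip seq.tail) = ((seq.zip seq.tail).length : Int) := by
    simp [PySem.List.len_eq]
  -- p = p0 is the only index at which the summand can be nonzero (uniqueness of the flat code)
  have huniq : ∀ p : Int, 0 ≤ p →
      ((decide (p < k) &&
        ((PySem.List.pyGetD (seq.zip seq.tail) p ((0:Int),(0:Int))).1 == 0 ||
         (PySem.List.pyGetD (seq.zip seq.tail) p ((0:Int),(0:Int))).1 == 1) &&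
        ((PySem.List.pyGetD (seq.zip seq.tail) p ((0:Int),(0:Int))).2 == 0 ||
         (PySem.List.pyGetD (seq.zip seq.tail) p ((0:Int),(0:Int))).2 == 1)) = true) →
      (2 * (PySem.List.pyGetD (seq.zip seq.tail) p ((0:Int),(0:Int))).1 +
         (PySem.List.pyGetD (seq.zip seq.tail) p ((0:Int),(0:Int))).2) * k + p =
        ((j0 * k.toNat + p0 : Nat) : Int) →
      p = ((p0 : Nat) : Int) := by
    intro p hp0 hc hidx
    simp only [Bool.and_eq_true, decide_eq_true_eq, Bool.or_eq_true, beq_iff_eq] at hc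
    obtain ⟨⟨hpk, ha⟩, hb⟩ := hc
    rcases ha with h1 | h1 <;> rcases hb with h2 | h2 <;>
      (rw [h1, h2] at hidx; interval_cases j0 <;> omega)
  by_cases hcase : p0 + 1 < seq.length
  · have hp0z : p0 < (seq.zip seq.tail).length := by omega
    rw [pv_sum_eq_single ((p0 : Nat) : Int) _ _
        (PySem.List.nodup_pyRange_one 0 (PySem.List.len (seq.zip seq.tail)))
        (PySem.List.mem_pyRange_one.mpr ⟨by omega, by rw [hlen]; exact_mod_cast hp0z⟩) ?zero]
    case zero =>
      intro p hpm hne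
      obtain ⟨hp1, hp2⟩ := PySem.List.mem_pyRange_one.mp hpm
      dsimp only [Function.comp]
      rw [if_neg]
      rintro ⟨hc, hidx⟩
      exact hne (huniq p hp1 hc hidx)
    · dsimp only [Function.comp]
      simp only [pv_zip_getD seq p0 hp0z]
      have ha01 : ((j0 / 2 : Nat) : Int) = 0 ∨ ((j0 / 2 : Nat) : Int) = 1 := by
        interval_cases j0 <;> simp
      have hb01 : ((j0 % 2 : Nat) : Int) = 0 ∨ ((j0 % 2 : Nat) : Int) = 1 := by
        interval_cases j0 <;> simp
      have hg1 : PySem.List.pyGetD seq ((p0 : Nat) : Int) 0 = seq.getD p0 0 :=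
        PySem.List.pyGetD_natCast _ _ _
      have hg2 : PySem.List.pyGetD seq (((p0 : Nat) : Int) + 1) 0 = seq.getD (p0 + 1) 0 := by
        rw [show (((p0 : Nat) : Int) + 1) = (((p0 + 1 : Nat)) : Int) by push_cast; ring,
            PySem.List.pyGetD_natCast]
      rw [hg1, hg2]
      by_cases hab : seq.getD p0 0 = ((j0 / 2 : Nat) : Int) ∧ seq.getD (p0 + 1) 0 = ((j0 % 2 : Nat) : Int)
      · obtain ⟨hA, hB⟩ := hab
        rw [if_pos, if_pos ⟨by push_cast; omega, hA, hB⟩]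
        constructor
        · simp only [Bool.and_eq_true, decide_eq_true_eq, Bool.or_eq_true, beq_iff_eq]
          refine ⟨⟨by omega, ?_⟩, ?_⟩
          · rw [hA]; exact ha01
          · rw [hB]; exact hb01
        · rw [hA, hB]; interval_cases j0 <;> push_cast <;> omega
      · rw [if_neg, if_neg (by rintro ⟨-, h2, h3⟩; exact hab ⟨h2, h3⟩)]
        rintro ⟨hc, hidx⟩
        simp only [Bool.and_eq_true, decide_eq_true_eq, Bool.or_eq_true, beq_iff_eq] at hc
        obtain ⟨⟨-, ha⟩, hb⟩ := hc
        apply hab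
        rcases ha with h1 | h1 <;> rcases hb with h2 | h2 <;>
          (rw [h1, h2] at hidx ⊢
           constructor <;> [skip; skip] <;> · interval_cases j0 <;> simp <;> omega)
  · rw [List.sum_eq_zero, if_neg (by rintro ⟨h1, -⟩; omega)]
    intro y hy
    obtain ⟨p, hpm, rfl⟩ := List.mem_map.mp hy
    obtain ⟨hp1, hp2⟩ := PySem.List.mem_pyRange_one.mp hpm
    dsimp only [Function.comp]
    rw [if_neg]
    rintro ⟨hc, hidx⟩
    have hpp0 : p = ((p0 : Nat) : Int) := huniq p hp1 hc hidx
    rw [hlen] at hp2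
    omega

-- ===== VERDICT (by name: the statement is the Claim_ definition above) =====
theorem Blocs2Moins_spec : Claim_equal_Blocs2Moins := by
  intro dictEtatS k _hdom hpre
  unfold Pre_Blocs2Moins at hpre
  unfold Spec_Blocs2Moins
  apply List.ext_getElem
  · rw [Blocs2Moins_len, Blocs2Moins_alt_len]
  intro q h1 h2
  rw [← List.getD_eq_getElem (Blocs2Moins dictEtatS k) 0 h1,
      ← List.getD_eq_getElem (Blocs2Moins_alt dictEtatS k) 0 h2]
  rw [Blocs2Moins_len] at h1
  have hK : 0 < k.toNat := by omega
  have hj0 : q / k.toNat < 4 := (Nat.div_lt_iff_lt_mul hK).mpr (by omega)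
  have hp0 : q % k.toNat < k.toNat := Nat.mod_lt _ hK
  have hq' : q = q / k.toNat * k.toNat + q % k.toNat := (Nat.div_add_mod' q k.toNat).symm
  rw [hq', pv_A_getD, pv_alt_getD dictEtatS k _ (by omega),
      pv_keys_lookup (fun seq1 v => pvCsV k (q / k.toNat * k.toNat + q % k.toNat) seq1 v) dictEtatS hpre]
  apply congrArg List.sum
  apply List.map_congr_left
  intro pr _
  rw [show (pr : List Int × Int) = (pr.1, pr.2) from rfl]
  rw [pv_cell_eq k _ _ hj0 hp0 pr.1 pr.2, pv_contrib_eq k _ _ hj0 hp0 pr.1 pr.2]
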